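-- pv_equiv track=rewrite | github.com/RepoRoots/JobResumeChanger | utils/resume_analyzer.py | _get_keyword_variations
-- ===== SOURCE A (Python) =====
-- def _get_keyword_variations(keyword: str) -> list[str]:
--     """Get common variations of a keyword."""
--     variations = []
--
--     # Handle common abbreviations and full forms
--     abbrev_map = {
--         'javascript': ['js', 'javascript', 'ecmascript'],
--         'typescript': ['ts', 'typescript'],
--         'python': ['python', 'py'],
--         'kubernetes': ['kubernetes', 'k8s', 'kube'],
--         'postgresql': ['postgresql', 'postgres', 'psql'],
--         'mongodb': ['mongodb', 'mongo'],
--         'continuous integration': ['ci', 'ci/cd', 'continuous integration'],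
--         'continuous deployment': ['cd', 'ci/cd', 'continuous deployment'],
--         'amazon web services': ['aws', 'amazon web services'],
--         'google cloud platform': ['gcp', 'google cloud', 'google cloud platform'],
--         'machine learning': ['ml', 'machine learning'],
--         'artificial intelligence': ['ai', 'artificial intelligence'],
--         'natural language processing': ['nlp', 'natural language processing'],
--         'restful': ['rest', 'restful', 'rest api'],
--     }
--
--     keyword_lower = keyword.lower()
--     for full_form, abbrevs in abbrev_map.items():
--         if keyword_lower in abbrevs:
--             variations.extend(abbrevs)
--
--     # Handle hyphenation variations
--     if '-' in keyword:
--         variations.append(keyword.replace('-', ' '))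
--         variations.append(keyword.replace('-', ''))
--     else:
--         variations.append(keyword.replace(' ', '-'))
--
--     # Handle .js/.py extensions
--     if keyword_lower.endswith('.js'):
--         variations.append(keyword_lower[:-3])
--     elif keyword_lower.endswith('.py'):
--         variations.append(keyword_lower[:-3])
--
--     return list(set(variations))
-- ===== SOURCE B (Python) =====
-- # Precomputed reverse-lookup index: each abbreviation token maps to the union
-- # (concatenation) of every variation group that contains it, so a call does one
-- # dict lookup instead of scanning all groups; result is accumulated in a set.
-- _INDEX = {
--     'js': ['js', 'javascript', 'ecmascript'],
--     'javascript': ['js', 'javascript', 'ecmascript'],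
--     'ecmascript': ['js', 'javascript', 'ecmascript'],
--     'ts': ['ts', 'typescript'],
--     'typescript': ['ts', 'typescript'],
--     'python': ['python', 'py'],
--     'py': ['python', 'py'],
--     'kubernetes': ['kubernetes', 'k8s', 'kube'],
--     'k8s': ['kubernetes', 'k8s', 'kube'],
--     'kube': ['kubernetes', 'k8s', 'kube'],
--     'postgresql': ['postgresql', 'postgres', 'psql'],
--     'postgres': ['postgresql', 'postgres', 'psql'],
--     'psql': ['postgresql', 'postgres', 'psql'],
--     'mongodb': ['mongodb', 'mongo'],
--     'mongo': ['mongodb', 'mongo'],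
--     'ci': ['ci', 'ci/cd', 'continuous integration'],
--     'ci/cd': ['ci', 'ci/cd', 'continuous integration', 'cd', 'ci/cd', 'continuous deployment'],
--     'continuous integration': ['ci', 'ci/cd', 'continuous integration'],
--     'cd': ['cd', 'ci/cd', 'continuous deployment'],
--     'continuous deployment': ['cd', 'ci/cd', 'continuous deployment'],
--     'aws': ['aws', 'amazon web services'],
--     'amazon web services': ['aws', 'amazon web services'],
--     'gcp': ['gcp', 'google cloud', 'google cloud platform'],
--     'google cloud': ['gcp', 'google cloud', 'google cloud platform'],
--     'google cloud platform': ['gcp', 'google cloud', 'google cloud platform'],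
--     'ml': ['ml', 'machine learning'],
--     'machine learning': ['ml', 'machine learning'],
--     'ai': ['ai', 'artificial intelligence'],
--     'artificial intelligence': ['ai', 'artificial intelligence'],
--     'nlp': ['nlp', 'natural language processing'],
--     'natural language processing': ['nlp', 'natural language processing'],
--     'rest': ['rest', 'restful', 'rest api'],
--     'restful': ['rest', 'restful', 'rest api'],
--     'rest api': ['rest', 'restful', 'rest api'],
-- }
--
--
-- def _get_keyword_variations(keyword: str) -> list[str]:
--     """Get common variations of a keyword."""
--     kl = keyword.lower()
--     out = set(_INDEX.get(kl, ()))
--     if '-' in keyword: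
--         out.add(keyword.replace('-', ' '))
--         out.add(keyword.replace('-', ''))
--     else:
--         out.add(keyword.replace(' ', '-'))
--     if kl.endswith(('.js', '.py')):
--         out.add(kl[:-3])
--     return list(out)
-- ===== Notes on version B (the rewrite author's own statement) =====
-- stated objective: idiomatic
-- what changed: A's per-call scan over all 14 abbreviation-map entries (membership test against every abbrev list, extending a list, then list(set(...))) is replaced by a single lookup in a precomputed reverse index token->union of its variation groups, with the result accumulated directly in a set via set.add instead of list appends plus a final dedup.
import Mathlib
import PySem

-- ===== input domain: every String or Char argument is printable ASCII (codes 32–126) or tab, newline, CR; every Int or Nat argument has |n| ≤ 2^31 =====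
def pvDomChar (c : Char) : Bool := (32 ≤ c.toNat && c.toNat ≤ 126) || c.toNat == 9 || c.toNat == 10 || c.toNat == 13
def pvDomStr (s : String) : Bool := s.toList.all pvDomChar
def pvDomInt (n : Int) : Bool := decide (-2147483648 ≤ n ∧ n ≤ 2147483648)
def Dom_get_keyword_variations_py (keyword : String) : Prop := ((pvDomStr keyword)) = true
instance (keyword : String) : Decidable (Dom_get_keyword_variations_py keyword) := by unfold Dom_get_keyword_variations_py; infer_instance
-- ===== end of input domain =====

-- B replaces A's per-call scan over the abbreviation map by one lookup in a precomputed
-- reverse index (token → union of its variation groups) and accumulates the result in a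
-- set directly instead of list appends followed by a final dedup; return value only.

-- ===== PORT A =====
def pvAbbrevMap : PySem.Dict String (List String) :=
  ⟨[("javascript", ["js", "javascript", "ecmascript"]),
   ("typescript", ["ts", "typescript"]),
   ("python", ["python", "py"]),
   ("kubernetes", ["kubernetes", "k8s", "kube"]),
   ("postgresql", ["postgresql", "postgres", "psql"]),
   ("mongodb", ["mongodb", "mongo"]),
   ("continuous integration", ["ci", "ci/cd", "continuous integration"]),
   ("continuous deployment", ["cd", "ci/cd", "continuous deployment"]),
   ("amazon web services", ["aws", "amazon web services"]),
   ("google cloud platform", ["gcp", "google cloud", "google cloud platform"]),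
   ("machine learning", ["ml", "machine learning"]),
   ("artificial intelligence", ["ai", "artificial intelligence"]),
   ("natural language processing", ["nlp", "natural language processing"]),
   ("restful", ["rest", "restful", "rest api"])]⟩

def get_keyword_variations_py (keyword : String) : List String :=
  let keyword_lower := PySem.Str.lower keyword
  -- for full_form, abbrevs in abbrev_map.items(): if keyword_lower in abbrevs: variations.extend(abbrevs)
  let variations :=
    pvAbbrevMap.items.foldl
      (fun variations fa => if keyword_lower ∈ fa.2 then variations ++ fa.2 else variations)
      ([] : List String)
  let variations :=
    if PySem.Str.isIn "-" keyword then
      variations ++ [PySem.Str.replace keyword "-" " "] ++ [PySem.Str.replace keyword "-" ""]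
    else
      variations ++ [PySem.Str.replace keyword " " "-"]
  let variations :=
    if PySem.Str.endswith keyword_lower ".js" then
      variations ++ [PySem.Str.slice keyword_lower none (some (-3))]
    else if PySem.Str.endswith keyword_lower ".py" then
      variations ++ [PySem.Str.slice keyword_lower none (some (-3))]
    else variations
  PySem.Set.ofList variations

-- ===== PORT B =====
-- precomputed reverse index: token → union of every variation group containing it
def pvIndex : PySem.Dict String (List String) :=
  ⟨[("js", ["js", "javascript", "ecmascript"]),
   ("javascript", ["js", "javascript", "ecmascript"]),
   ("ecmascript", ["js", "javascript", "ecmascript"]),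
   ("ts", ["ts", "typescript"]),
   ("typescript", ["ts", "typescript"]),
   ("python", ["python", "py"]),
   ("py", ["python", "py"]),
   ("kubernetes", ["kubernetes", "k8s", "kube"]),
   ("k8s", ["kubernetes", "k8s", "kube"]),
   ("kube", ["kubernetes", "k8s", "kube"]),
   ("postgresql", ["postgresql", "postgres", "psql"]),
   ("postgres", ["postgresql", "postgres", "psql"]),
   ("psql", ["postgresql", "postgres", "psql"]),
   ("mongodb", ["mongodb", "mongo"]),
   ("mongo", ["mongodb", "mongo"]),
   ("ci", ["ci", "ci/cd", "continuous integration"]),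
   ("ci/cd", ["ci", "ci/cd", "continuous integration", "cd", "ci/cd", "continuous deployment"]),
   ("continuous integration", ["ci", "ci/cd", "continuous integration"]),
   ("cd", ["cd", "ci/cd", "continuous deployment"]),
   ("continuous deployment", ["cd", "ci/cd", "continuous deployment"]),
   ("aws", ["aws", "amazon web services"]),
   ("amazon web services", ["aws", "amazon web services"]),
   ("gcp", ["gcp", "google cloud", "google cloud platform"]),
   ("google cloud", ["gcp", "google cloud", "google cloud platform"]),
   ("google cloud platform", ["gcp", "google cloud", "google cloud platform"]),
   ("ml", ["ml", "machine learning"]),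
   ("machine learning", ["ml", "machine learning"]),
   ("ai", ["ai", "artificial intelligence"]),
   ("artificial intelligence", ["ai", "artificial intelligence"]),
   ("nlp", ["nlp", "natural language processing"]),
   ("natural language processing", ["nlp", "natural language processing"]),
   ("rest", ["rest", "restful", "rest api"]),
   ("restful", ["rest", "restful", "rest api"]),
   ("rest api", ["rest", "restful", "rest api"])]⟩

def get_keyword_variations_py_alt (keyword : String) : List String :=
  let kl := PySem.Str.lower keyword
  let out : PySem.Set String := PySem.Set.ofList (pvIndex.getD kl [])
  let out :=
    if PySem.Str.isIn "-" keyword then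
      (out.add (PySem.Str.replace keyword "-" " ")).add (PySem.Str.replace keyword "-" "")
    else
      out.add (PySem.Str.replace keyword " " "-")
  let out :=
    if PySem.Str.endswith kl ".js" || PySem.Str.endswith kl ".py" then
      out.add (PySem.Str.slice kl none (some (-3)))
    else out
  out

-- ===== PRECONDITION & SPEC =====
def Spec_get_keyword_variations_py (keyword : String) (out : List String) : Prop := out = get_keyword_variations_py_alt keyword
instance (keyword : String) (out : List String) : Decidable (Spec_get_keyword_variations_py keyword out) := by unfold Spec_get_keyword_variations_py; infer_instance

-- ===== CLAIM =====
def Claim_equal_get_keyword_variations_py : Prop := ∀ (keyword : String), Dom_get_keyword_variations_py keyword → Spec_get_keyword_variations_py keyword (get_keyword_variations_py keyword)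

-- ===== LEMMAS AND PROOFS =====

-- the keys of pvIndex, in insertion order
def pvKeys : List String := ["js", "javascript", "ecmascript", "ts", "typescript", "python", "py", "kubernetes", "k8s", "kube", "postgresql", "postgres", "psql", "mongodb", "mongo", "ci", "ci/cd", "continuous integration", "cd", "continuous deployment", "aws", "amazon web services", "gcp", "google cloud", "google cloud platform", "ml", "machine learning", "ai", "artificial intelligence", "nlp", "natural language processing", "rest", "restful", "rest api"]

-- A's matching loop computes exactly the reverse-index lookup
set_option maxRecDepth 40000 in
lemma pvLoop_eq_lookup (kl : String) :
    pvAbbrevMap.items.foldl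
      (fun variations fa => if kl ∈ fa.2 then variations ++ fa.2 else variations)
      ([] : List String)
    = PySem.Dict.getD pvIndex kl [] := by
  by_cases h : kl ∈ pvKeys
  · fin_cases h <;> rfl
  · have hrw : pvIndex.keys = pvKeys := by rfl
    have hget : pvIndex.get? kl = none :=
      (PySem.Dict.get?_eq_none_iff_not_mem_keys _ _).mpr (hrw ▸ h)
    have hni : ∀ {l : List String}, l ⊆ pvKeys → kl ∉ l := fun hs hm => h (hs hm)
    simp only [pvAbbrevMap, List.foldl_cons, List.foldl_nil]
    rw [if_neg (hni (by decide))]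
    rw [if_neg (hni (by decide))]
    rw [if_neg (hni (by decide))]
    rw [if_neg (hni (by decide))]
    rw [if_neg (hni (by decide))]
    rw [if_neg (hni (by decide))]
    rw [if_neg (hni (by decide))]
    rw [if_neg (hni (by decide))]
    rw [if_neg (hni (by decide))]
    rw [if_neg (hni (by decide))]
    rw [if_neg (hni (by decide))]
    rw [if_neg (hni (by decide))]
    rw [if_neg (hni (by decide))]
    rw [if_neg (hni (by decide))]
    simp [PySem.Dict.getD, hget]

-- dedup of an appended tail is a fold of set-adds on the dedup of the prefix
lemma pvOfList_append {α : Type} [BEq α] (l r : List α) :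
    PySem.Set.ofList (l ++ r) = r.foldl PySem.Set.add (PySem.Set.ofList l) := by
  simp [PySem.Set.ofList_eq_foldl, List.foldl_append]

-- ===== VERDICT =====
theorem get_keyword_variations_py_spec : Claim_equal_get_keyword_variations_py := by
  intro keyword _
  simp only [Spec_get_keyword_variations_py, get_keyword_variations_py,
    get_keyword_variations_py_alt]
  rw [pvLoop_eq_lookup]
  cases hjs : PySem.Str.endswith (PySem.Str.lower keyword) ".js" <;>
    cases hpy : PySem.Str.endswith (PySem.Str.lower keyword) ".py" <;>
      cases hhy : PySem.Str.isIn "-" keyword <;>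
        simp [*, pvOfList_append, List.foldl]
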